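-- pv_equiv track=rewrite | github.com/Oron-Paz/Maximum-Likelihood-Decoding-Implementation | src/utils/hamming_codeword_generator.py | create_extended_hamming_codeword
-- ===== SOURCE A (Python) =====
-- def create_extended_hamming_codeword(message_bits, r):
--
--     k = len(message_bits)
--     n = 2**r
--
--     # Initialize codeword with zeros
--     codeword = [0] * n
--
--     # Place message bits in positions that are NOT powers of 2 (except last position)
--     message_idx = 0
--     for pos in range(1, n):  # positions 1 to n-1 (1-indexed)
--         if (pos & (pos - 1)) != 0:  # if pos is NOT a power of 2
--             codeword[pos - 1] = message_bits[message_idx]  # convert to 0-indexed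
--             message_idx += 1
--
--     # Calculate parity bits for positions that ARE powers of 2
--     for i in range(r):
--         parity_pos = 2**i  # positions 1, 2, 4, 8, 16, ...
--         parity_bit = 0
--
--         # XOR all positions that have bit i set in their binary representation
--         for pos in range(1, n):
--             if pos & parity_pos:  # if bit i is set in pos
--                 parity_bit ^= codeword[pos - 1]
--
--         codeword[parity_pos - 1] = parity_bit  # store parity bit
--
--     # Calculate overall parity bit (extension bit at last position)
--     overall_parity = sum(codeword[:-1]) % 2
--     codeword[n - 1] = overall_parity
--
--     return codeword
-- ===== SOURCE B (Python) =====
-- def create_extended_hamming_codeword(message_bits, r):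
--     n = 2 ** r
--     codeword = [0] * n
--     parity = [0] * r
--     # single scatter pass: place each message bit and fold it into every
--     # parity accumulator whose bit is set in its (1-indexed) position
--     idx = 0
--     for pos in range(1, n):
--         if pos & (pos - 1):
--             b = message_bits[idx]
--             idx += 1
--             codeword[pos - 1] = b
--             for i in range(r):
--                 if (pos >> i) & 1:
--                     parity[i] ^= b
--     for i in range(r):
--         codeword[(1 << i) - 1] = parity[i]
--     codeword[n - 1] = sum(codeword[:-1]) % 2
--     return codeword
-- ===== Notes on version B (the rewrite author's own statement) =====
-- stated objective: alternative
-- what changed: A computes each parity bit with its own full gather pass over all n positions (reading the codeword back); B makes a single scatter pass over the positions, folding each message bit into r running parity accumulators as it is placed, and writes the accumulators out afterwards.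
import Mathlib
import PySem

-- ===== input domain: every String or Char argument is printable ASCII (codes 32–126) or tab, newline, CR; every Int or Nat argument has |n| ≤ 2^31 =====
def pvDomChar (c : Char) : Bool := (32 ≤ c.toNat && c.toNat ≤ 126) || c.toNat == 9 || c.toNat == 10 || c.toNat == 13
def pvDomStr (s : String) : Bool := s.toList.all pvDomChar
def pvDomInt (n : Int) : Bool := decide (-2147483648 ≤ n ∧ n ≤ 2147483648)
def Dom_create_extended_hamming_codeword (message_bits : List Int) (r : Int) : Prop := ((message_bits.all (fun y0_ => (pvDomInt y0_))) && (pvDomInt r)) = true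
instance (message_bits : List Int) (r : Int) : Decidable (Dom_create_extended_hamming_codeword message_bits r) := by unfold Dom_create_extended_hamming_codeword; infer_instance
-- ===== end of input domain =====

-- B replaces A's per-parity gather passes by one scatter pass with r running parity
-- accumulators (objective: alternative decomposition, same asymptotic cost).

-- ===== PORT A =====
-- A-side helpers: the two loop bodies of A, named so the proofs can refer to them.
-- body of A's first loop: place the next message bit at a non-power-of-2 position
-- (message_bits[message_idx] raises IndexError outside Pre_, here totalized with .getD 0)
def pvA_place (msg : List Int) (st : List Int × Int) (pos : Int) : List Int × Int :=
  if PySem.Int.band pos (pos - 1) ≠ 0 then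
    (PySem.List.pySetD st.1 (pos - 1) ((PySem.List.pyGet? msg st.2).getD 0), st.2 + 1)
  else st

-- A's inner gather loop for one parity bit: `for pos in ps: if pos & ppos: acc ^= cw[pos-1]`
def pvA_gather (cw : List Int) (ppos : Int) (acc : Int) (ps : List Int) : Int :=
  ps.foldl (fun a pos =>
    if PySem.Int.band pos ppos ≠ 0 then PySem.Int.bxor a (PySem.List.pyGetD cw (pos - 1) 0)
    else a) acc

def create_extended_hamming_codeword (message_bits : List Int) (r : Int) : List Int :=
  -- n = 2**r (Pre_ gives 0 ≤ r, so r.toNat is exact)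
  let n : Int := 2 ^ r.toNat
  -- first loop: place message bits
  let s1 := (PySem.List.pyRange 1 n 1).foldl (pvA_place message_bits) (List.replicate (2 ^ r.toNat) 0, 0)
  -- second loop: for i in range(r), gather parity bit over all positions and store it
  let cw2 := (PySem.List.pyRange 0 r 1).foldl
      (fun cw i =>
        PySem.List.pySetD cw ((2 ^ i.toNat : Int) - 1)
          (pvA_gather cw (2 ^ i.toNat) 0 (PySem.List.pyRange 1 n 1)))
      s1.1
  -- overall parity: sum(codeword[:-1]) % 2
  PySem.List.pySetD cw2 (n - 1) (PySem.Int.mod (PySem.List.slice cw2 none (some (-1))).sum 2)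

-- ===== PORT B =====
-- B-side helpers: B's inner scatter loop and the body of B's single pass.
-- `for i in range(r): if (pos >> i) & 1: parity[i] ^= b`
def pvB_scatter (r pos b : Int) (par : List Int) : List Int :=
  (PySem.List.pyRange 0 r 1).foldl
    (fun par i =>
      if PySem.Int.band (pos >>> i.toNat) 1 ≠ 0 then
        PySem.List.pySetD par i (PySem.Int.bxor (PySem.List.pyGetD par i 0) b)
      else par) par

def pvB_place (msg : List Int) (r : Int) (st : (List Int × List Int) × Int) (pos : Int) :
    (List Int × List Int) × Int :=
  if PySem.Int.band pos (pos - 1) ≠ 0 then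
    let b := (PySem.List.pyGet? msg st.2).getD 0
    ((PySem.List.pySetD st.1.1 (pos - 1) b, pvB_scatter r pos b st.1.2), st.2 + 1)
  else st

def create_extended_hamming_codeword_alt (message_bits : List Int) (r : Int) : List Int :=
  let n : Int := 2 ^ r.toNat
  -- single scatter pass: codeword, parity accumulators, message index
  let s1 := (PySem.List.pyRange 1 n 1).foldl (pvB_place message_bits r)
      ((List.replicate (2 ^ r.toNat) 0, List.replicate r.toNat 0), 0)
  -- write the accumulators: codeword[(1 << i) - 1] = parity[i]
  let cw2 := (PySem.List.pyRange 0 r 1).foldl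
      (fun cw i => PySem.List.pySetD cw (((1 : Int) <<< i.toNat) - 1) (PySem.List.pyGetD s1.1.2 i 0))
      s1.1.1
  PySem.List.pySetD cw2 (n - 1) (PySem.Int.mod (PySem.List.slice cw2 none (some (-1))).sum 2)

-- ===== PRECONDITION & SPEC =====
-- Pre_ excludes exactly the inputs on which Python A raises: r < 0 (TypeError from [0]*(2**r))
-- and message lists shorter than the 2^r - 1 - r data positions (IndexError).
-- (r.toNat ≤ log2 (len + r + 1) is exactly 2^r ≤ len + r + 1, i.e. len ≥ 2^r - 1 - r,
--  stated via Nat.log2 so deciding it never computes the huge power 2^r.)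
def Pre_create_extended_hamming_codeword (message_bits : List Int) (r : Int) : Prop :=
  0 ≤ r ∧ r.toNat ≤ Nat.log2 (message_bits.length + r.toNat + 1)

instance (message_bits : List Int) (r : Int) : Decidable (Pre_create_extended_hamming_codeword message_bits r) := by
  unfold Pre_create_extended_hamming_codeword; infer_instance

def pvWitness_create_extended_hamming_codeword : List Int × Int := ([1, 0, 1, 1], 3)

def Spec_create_extended_hamming_codeword (message_bits : List Int) (r : Int) (out : List Int) : Prop := out = create_extended_hamming_codeword_alt message_bits r
instance (message_bits : List Int) (r : Int) (out : List Int) : Decidable (Spec_create_extended_hamming_codeword message_bits r out) := by unfold Spec_create_extended_hamming_codeword; infer_instance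

-- ===== CLAIM (what is proved, stated in full; the proofs are below) =====
def Claim_equal_create_extended_hamming_codeword : Prop := ∀ (message_bits : List Int) (r : Int), Dom_create_extended_hamming_codeword message_bits r → Pre_create_extended_hamming_codeword message_bits r → Spec_create_extended_hamming_codeword message_bits r (create_extended_hamming_codeword message_bits r)

-- ===== LEMMAS AND PROOFS =====

-- pyGetD/pySetD on nonnegative indices: frame, read-back, replicate
theorem pv_getD_setD_ne (xs : List Int) (i j : Int) (v d : Int)
    (hi : 0 ≤ i) (hj : 0 ≤ j) (hne : i ≠ j) :
    PySem.List.pyGetD (PySem.List.pySetD xs i v) j d = PySem.List.pyGetD xs j d := by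
  rw [PySem.List.pySetD_of_nonneg _ _ hi, PySem.List.pyGetD_of_nonneg _ _ hj,
      PySem.List.pyGetD_of_nonneg _ _ hj, List.getD_eq_getElem?_getD, List.getD_eq_getElem?_getD,
      List.getElem?_set_ne (by omega)]

theorem pv_getD_setD_self (xs : List Int) (i : Int) (v d : Int)
    (hi : 0 ≤ i) (hlt : i < (xs.length : Int)) :
    PySem.List.pyGetD (PySem.List.pySetD xs i v) i d = v := by
  rw [PySem.List.pySetD_of_nonneg _ _ hi, PySem.List.pyGetD_of_nonneg _ _ hi,
      List.getD_eq_getElem?_getD, List.getElem?_set_self (by omega)]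
  rfl

theorem pv_getD_replicate (n : Nat) (i : Int) (hi : 0 ≤ i) :
    PySem.List.pyGetD (List.replicate n (0 : Int)) i 0 = 0 := by
  rw [PySem.List.pyGetD_of_nonneg _ _ hi, List.getD_eq_getElem?_getD, List.getElem?_replicate]
  split <;> rfl

-- Mathlib's Int-Int shifts on nonnegative operands reduce to the Nat shifts
theorem pv_shiftR (m i : Nat) : ((m : Int) >>> ((i : Nat) : Int)) = ((m >>> i : Nat) : Int) := by
  cases i <;> rfl

theorem pv_one_shiftL (k : Nat) : ((1 : Int) <<< ((k : Nat) : Int)) = (2 : Int) ^ k := by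
  rw [Int.one_shiftLeft]; push_cast; ring

-- bit bridges: `pos & (1 << i) != 0` vs `(pos >> i) & 1 != 0`, disjointness of powers of 2
theorem pv_bit_bridge (p : Int) (i : Nat) (hp : 0 ≤ p) :
    (PySem.Int.band p (2 ^ i) ≠ 0) ↔ (PySem.Int.band (p >>> ((i : Nat) : Int)) 1 ≠ 0) := by
  obtain ⟨m, rfl⟩ : ∃ m : Nat, p = (m : Int) := ⟨p.toNat, (Int.toNat_of_nonneg hp).symm⟩
  have h2 : ((2 : Int) ^ i) = ((2 ^ i : Nat) : Int) := by push_cast; ring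
  rw [h2, pv_shiftR, PySem.Int.band_natCast, show (1:Int) = ((1:Nat):Int) from rfl,
      PySem.Int.band_natCast]
  have ht1 : m &&& 2 ^ i = (m.testBit i).toNat * 2 ^ i := Nat.and_two_pow m i
  have ht2 : (m >>> i) &&& 1 = (m.testBit i).toNat * 1 := by
    simpa [Nat.testBit_shiftRight] using Nat.and_two_pow (m >>> i) 0
  rw [ne_eq, ne_eq, Int.natCast_eq_zero, Int.natCast_eq_zero, ht1, ht2]
  rcases m.testBit i <;> simp

theorem pv_pow_band (i j : Nat) (h : i ≠ j) :
    PySem.Int.band ((2 : Int) ^ j) ((2 : Int) ^ i) = 0 := by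
  have h2 : ∀ k : Nat, ((2 : Int) ^ k) = ((2 ^ k : Nat) : Int) := by intro k; push_cast; ring
  rw [h2, h2, PySem.Int.band_natCast, Nat.and_two_pow, Nat.testBit_two_pow]
  simp [Ne.symm h]

-- unfolding one step of A's gather loop
theorem pvA_gather_cons (cw : List Int) (ppos acc p : Int) (ps : List Int) :
    pvA_gather cw ppos acc (p :: ps)
      = pvA_gather cw ppos
          (if PySem.Int.band p ppos ≠ 0 then
            PySem.Int.bxor acc (PySem.List.pyGetD cw (p - 1) 0) else acc) ps := rfl

theorem pv_len_scatter (r pos b : Int) (par : List Int) :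
    (pvB_scatter r pos b par).length = par.length := by
  unfold pvB_scatter
  generalize PySem.List.pyRange 0 r 1 = is
  induction is generalizing par with
  | nil => rfl
  | cons j rest ih =>
    rw [List.foldl_cons, ih]
    split
    · simp [PySem.List.length_pySetD]
    · rfl

-- pass 1 of B simulates pass 1 of A on the codeword/index components
theorem pv_sync1 (msg : List Int) (r : Int) (ps : List Int) (st : (List Int × List Int) × Int) :
    ((ps.foldl (pvB_place msg r) st).1.1, (ps.foldl (pvB_place msg r) st).2)
      = ps.foldl (pvA_place msg) (st.1.1, st.2) := by
  induction ps generalizing st with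
  | nil => rfl
  | cons p rest ih =>
    rw [List.foldl_cons, List.foldl_cons, ih]
    congr 1
    by_cases h : PySem.Int.band p (p - 1) = 0 <;> simp [pvA_place, pvB_place, h]

-- pass 1 of A writes only at non-power positions
theorem pv_frame1 (msg : List Int) (ps : List Int) (st : List Int × Int) (q : Int) (hq : 0 ≤ q)
    (hpos : ∀ p ∈ ps, 1 ≤ p)
    (h : ∀ p ∈ ps, PySem.Int.band p (p - 1) ≠ 0 → p - 1 ≠ q) :
    PySem.List.pyGetD (ps.foldl (pvA_place msg) st).1 q 0 = PySem.List.pyGetD st.1 q 0 := by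
  induction ps generalizing st with
  | nil => rfl
  | cons p rest ih =>
    rw [List.foldl_cons, ih _ (fun p hp => hpos p (by simp [hp])) (fun p hp => h p (by simp [hp]))]
    unfold pvA_place
    split
    · next hc =>
      exact pv_getD_setD_ne _ _ _ _ _ (by have := hpos p (by simp); omega) hq
        (h p (by simp) hc)
    · rfl

-- projection of B's scatter loop at one index (generic index list)
theorem pv_scatter_gen (pos b : Int) (is : List Int) (par : List Int) (i : Int)
    (hnd : is.Nodup) (hnn : ∀ j ∈ is, 0 ≤ j) (hi : 0 ≤ i) (hlt : i < (par.length : Int)) :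
    PySem.List.pyGetD
      (is.foldl (fun par j =>
        if PySem.Int.band (pos >>> ((j.toNat : Nat) : Int)) 1 ≠ 0 then
          PySem.List.pySetD par j (PySem.Int.bxor (PySem.List.pyGetD par j 0) b)
        else par) par) i 0
    = if i ∈ is ∧ PySem.Int.band (pos >>> ((i.toNat : Nat) : Int)) 1 ≠ 0 then
        PySem.Int.bxor (PySem.List.pyGetD par i 0) b
      else PySem.List.pyGetD par i 0 := by
  induction is generalizing par with
  | nil => simp
  | cons j rest ih =>
    rw [List.foldl_cons]
    have hjn : 0 ≤ j := hnn j (by simp)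
    have hnd' := List.nodup_cons.mp hnd
    by_cases hij : i = j
    · subst hij
      have hnotin : i ∉ rest := hnd'.1
      by_cases hc : PySem.Int.band (pos >>> ((i.toNat : Nat) : Int)) 1 ≠ 0
      · rw [if_pos hc,
          ih _ hnd'.2 (fun q hq => hnn q (by simp [hq]))
            (by rw [PySem.List.length_pySetD]; exact hlt)]
        rw [if_neg (fun hh => hnotin hh.1), if_pos ⟨by simp, hc⟩,
          pv_getD_setD_self _ _ _ _ hi hlt]
      · rw [if_neg hc, ih _ hnd'.2 (fun q hq => hnn q (by simp [hq])) hlt]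
        rw [if_neg (fun hh => hc hh.2), if_neg (fun hh => hc hh.2)]
    · by_cases hc : PySem.Int.band (pos >>> ((j.toNat : Nat) : Int)) 1 ≠ 0
      · rw [if_pos hc,
          ih _ hnd'.2 (fun q hq => hnn q (by simp [hq]))
            (by rw [PySem.List.length_pySetD]; exact hlt)]
        rw [pv_getD_setD_ne _ _ _ _ _ hjn hi (fun hh => hij hh.symm)]
        exact if_congr (and_congr_left' (List.mem_cons.trans (or_iff_right hij)).symm) rfl rfl
      · rw [if_neg hc, ih _ hnd'.2 (fun q hq => hnn q (by simp [hq])) hlt]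
        exact if_congr (and_congr_left' (List.mem_cons.trans (or_iff_right hij)).symm) rfl rfl

theorem pv_scatter_proj (r pos b : Int) (par : List Int) (i : Int)
    (hi : 0 ≤ i) (hir : i < r) (hlt : i < (par.length : Int)) :
    PySem.List.pyGetD (pvB_scatter r pos b par) i 0 =
      if PySem.Int.band (pos >>> ((i.toNat : Nat) : Int)) 1 ≠ 0 then
        PySem.Int.bxor (PySem.List.pyGetD par i 0) b
      else PySem.List.pyGetD par i 0 := by
  unfold pvB_scatter
  rw [pv_scatter_gen pos b _ par i (PySem.List.nodup_pyRange_one _ _)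
      (fun j hj => ((PySem.List.mem_pyRange_one).mp hj).1) hi hlt]
  have hmem : i ∈ PySem.List.pyRange 0 r 1 := PySem.List.mem_pyRange_one.mpr ⟨hi, hir⟩
  simp [hmem]

-- MAIN INVARIANT: after B's pass over ps, parity[i] equals A's gather over ps
-- read from A's final pass-1 codeword, threaded from parity[i]'s current value.
theorem pv_parity_inv (msg : List Int) (r : Int) (ps : List Int)
    (st : (List Int × List Int) × Int)
    (hsort : ps.Pairwise (· < ·))
    (hpos : ∀ p ∈ ps, 1 ≤ p ∧ p - 1 < (st.1.1.length : Int))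
    (hzero : ∀ p ∈ ps, PySem.Int.band p (p - 1) = 0 → PySem.List.pyGetD st.1.1 (p - 1) 0 = 0)
    (hlen : st.1.2.length = r.toNat)
    (i : Int) (hi : 0 ≤ i) (hir : i < r) :
    PySem.List.pyGetD (ps.foldl (pvB_place msg r) st).1.2 i 0 =
      pvA_gather (ps.foldl (pvA_place msg) (st.1.1, st.2)).1 (2 ^ i.toNat)
        (PySem.List.pyGetD st.1.2 i 0) ps := by
  induction ps generalizing st with
  | nil => rfl
  | cons p rest ih =>
    obtain ⟨hp1, hplen⟩ := hpos p (by simp)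
    have hsort' := List.pairwise_cons.mp hsort
    have hrest_gt : ∀ q ∈ rest, p < q := hsort'.1
    rw [List.foldl_cons, List.foldl_cons]
    by_cases hc : PySem.Int.band p (p - 1) = 0
    · -- power-of-2 position: both states unchanged, gather head contributes 0
      have hA : pvA_place msg (st.1.1, st.2) p = (st.1.1, st.2) := by simp [pvA_place, hc]
      have hB : pvB_place msg r st p = st := by simp [pvB_place, hc]
      rw [hA, hB,
        ih st hsort'.2 (fun q hq => hpos q (by simp [hq])) (fun q hq => hzero q (by simp [hq])) hlen,
        pvA_gather_cons]
      congr 1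
      by_cases hcb : PySem.Int.band p (2 ^ i.toNat) = 0
      · rw [if_neg (fun hh => hh hcb)]
      · rw [if_pos hcb]
        have hframe : PySem.List.pyGetD (rest.foldl (pvA_place msg) (st.1.1, st.2)).1 (p-1) 0
            = PySem.List.pyGetD st.1.1 (p-1) 0 := by
          apply pv_frame1 _ _ _ _ (by omega) (fun q hq => (hpos q (by simp [hq])).1)
          intro q hq _
          have := hrest_gt q hq; omega
        rw [hframe, hzero p (by simp) hc, PySem.Int.bxor_zero]
    · -- data position
      have hA : pvA_place msg (st.1.1, st.2) p
          = (PySem.List.pySetD st.1.1 (p-1) ((PySem.List.pyGet? msg st.2).getD 0), st.2 + 1) := by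
        simp [pvA_place, hc]
      have hB : pvB_place msg r st p
          = ((PySem.List.pySetD st.1.1 (p-1) ((PySem.List.pyGet? msg st.2).getD 0),
              pvB_scatter r p ((PySem.List.pyGet? msg st.2).getD 0) st.1.2), st.2 + 1) := by
        simp [pvB_place, hc]
      rw [hA, hB]
      have ihst := ih (((PySem.List.pySetD st.1.1 (p-1) ((PySem.List.pyGet? msg st.2).getD 0),
              pvB_scatter r p ((PySem.List.pyGet? msg st.2).getD 0) st.1.2), st.2 + 1))
        hsort'.2
        (by
          intro q hq
          obtain ⟨hq1, hq2⟩ := hpos q (by simp [hq])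
          refine ⟨hq1, ?_⟩
          rw [PySem.List.length_pySetD]; exact hq2)
        (by
          intro q hq hqpow
          have hqp : p < q := hrest_gt q hq
          rw [pv_getD_setD_ne _ _ _ _ _ (by omega) (by have := (hpos q (by simp [hq])).1; omega)
            (by omega)]
          exact hzero q (by simp [hq]) hqpow)
        (by rw [pv_len_scatter]; exact hlen)
      dsimp only at ihst
      rw [ihst, pvA_gather_cons]
      congr 1
      rw [pv_scatter_proj r p _ _ i hi hir (by rw [hlen]; omega)]
      have hval : PySem.List.pyGetD
          (rest.foldl (pvA_place msg)
            (PySem.List.pySetD st.1.1 (p-1) ((PySem.List.pyGet? msg st.2).getD 0), st.2 + 1)).1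
          (p-1) 0 = (PySem.List.pyGet? msg st.2).getD 0 := by
        rw [pv_frame1 _ _ _ _ (by omega) (fun q hq => (hpos q (by simp [hq])).1)
          (by intro q hq _; have := hrest_gt q hq; omega)]
        exact pv_getD_setD_self _ _ _ _ (by omega) hplen
      rw [hval]
      have hcond := pv_bit_bridge p i.toNat (by omega)
      by_cases hcb : PySem.Int.band p (2 ^ i.toNat) = 0
      · rw [if_neg (fun hh => (hcond.mpr hh) hcb), if_neg (fun hh => hh hcb)]
      · rw [if_pos (hcond.mp hcb), if_pos hcb]

-- a write at a position without bit i does not change gather_i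
theorem pv_gather_inv (cw : List Int) (t v ppos acc : Int) (ps : List Int)
    (ht : 0 ≤ t) (hps : ∀ p ∈ ps, 1 ≤ p)
    (hband : PySem.Int.band (t + 1) ppos = 0) :
    pvA_gather (PySem.List.pySetD cw t v) ppos acc ps = pvA_gather cw ppos acc ps := by
  unfold pvA_gather
  refine PySem.List.foldl_congr_mem _ _ _ _ ?_
  intro a p hp
  by_cases hc : PySem.Int.band p ppos = 0
  · rw [if_neg (fun hh => hh hc), if_neg (fun hh => hh hc)]
  · rw [if_pos hc, if_pos hc]
    congr 1
    have hne : t ≠ p - 1 := by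
      intro hh
      apply hc
      rw [show p = t + 1 by omega]
      exact hband
    exact pv_getD_setD_ne _ _ _ _ _ ht (by have := hps p hp; omega) hne

-- pass 2: A's gathering writes equal B's accumulator writes
theorem pv_pass2 (P : List Int) (g : Int → Int) (is : List Int) (cw : List Int)
    (hnd : is.Nodup) (hnn : ∀ j ∈ is, 0 ≤ j) (hP : ∀ p ∈ P, 1 ≤ p)
    (hg : ∀ i ∈ is, pvA_gather cw (2 ^ i.toNat) 0 P = g i) :
    is.foldl (fun cw i => PySem.List.pySetD cw ((2 ^ i.toNat : Int) - 1)
        (pvA_gather cw (2 ^ i.toNat) 0 P)) cw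
      = is.foldl (fun cw i =>
          PySem.List.pySetD cw (((1 : Int) <<< ((i.toNat : Nat) : Int)) - 1) (g i)) cw := by
  induction is generalizing cw with
  | nil => rfl
  | cons j rest ih =>
    have hjn : 0 ≤ j := hnn j (by simp)
    have hnd' := List.nodup_cons.mp hnd
    rw [List.foldl_cons, List.foldl_cons, pv_one_shiftL j.toNat, hg j (by simp)]
    apply ih _ hnd'.2 (fun q hq => hnn q (by simp [hq]))
    intro i hirest
    rw [← hg i (by simp [hirest])]
    have hij : i.toNat ≠ j.toNat := by
      have hin : 0 ≤ i := hnn i (by simp [hirest])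
      have hne : i ≠ j := fun hh => hnd'.1 (hh ▸ hirest)
      omega
    have hpow : (0:Int) < 2 ^ j.toNat := by positivity
    exact pv_gather_inv cw ((2 ^ j.toNat : Int) - 1) (g j) (2 ^ i.toNat) 0 P
      (by omega) hP
      (by rw [show ((2 ^ j.toNat : Int) - 1 + 1) = ((2:Int) ^ j.toNat) by ring]
          exact pv_pow_band i.toNat j.toNat hij)

-- ===== VERDICT (by name: the statement is the Claim_ definition above) =====
theorem create_extended_hamming_codeword_spec : Claim_equal_create_extended_hamming_codeword := by
  intro msg r _hdom _hpre
  unfold Spec_create_extended_hamming_codeword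
  simp only [create_extended_hamming_codeword, create_extended_hamming_codeword_alt]
  have hcast : (((2:Nat) ^ r.toNat : Nat) : Int) = (2:Int) ^ r.toNat := by push_cast; ring
  have hsync := pv_sync1 msg r (PySem.List.pyRange 1 ((2:Int) ^ r.toNat) 1)
      ((List.replicate (2 ^ r.toNat) 0, List.replicate r.toNat 0), 0)
  have hcw := congrArg Prod.fst hsync
  dsimp only at hcw hsync
  have hg : ∀ i ∈ PySem.List.pyRange 0 r 1,
      pvA_gather ((PySem.List.pyRange 1 ((2:Int) ^ r.toNat) 1).foldl (pvA_place msg)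
          (List.replicate (2 ^ r.toNat) 0, 0)).1 (2 ^ i.toNat) 0
        (PySem.List.pyRange 1 ((2:Int) ^ r.toNat) 1)
      = PySem.List.pyGetD ((PySem.List.pyRange 1 ((2:Int) ^ r.toNat) 1).foldl (pvB_place msg r)
          ((List.replicate (2 ^ r.toNat) 0, List.replicate r.toNat 0), 0)).1.2 i 0 := by
    intro i hi
    obtain ⟨hi0, hir⟩ := PySem.List.mem_pyRange_one.mp hi
    have hpi := pv_parity_inv msg r (PySem.List.pyRange 1 ((2:Int) ^ r.toNat) 1)
        ((List.replicate (2 ^ r.toNat) 0, List.replicate r.toNat 0), 0)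
        (PySem.List.pairwise_lt_pyRange_one _ _)
        (by
          intro p hp
          obtain ⟨h1, h2⟩ := PySem.List.mem_pyRange_one.mp hp
          refine ⟨h1, ?_⟩
          rw [List.length_replicate, hcast]
          omega)
        (by
          intro p hp _
          have h1 := (PySem.List.mem_pyRange_one.mp hp).1
          exact pv_getD_replicate _ _ (by omega))
        (by rw [List.length_replicate])
        i hi0 hir
    dsimp only at hpi
    rw [hpi, pv_getD_replicate _ _ hi0]
  rw [hcw]
  rw [← pv_pass2 (PySem.List.pyRange 1 ((2:Int) ^ r.toNat) 1)
      (fun i => PySem.List.pyGetD ((PySem.List.pyRange 1 ((2:Int) ^ r.toNat) 1).foldl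
          (pvB_place msg r) ((List.replicate (2 ^ r.toNat) 0, List.replicate r.toNat 0), 0)).1.2 i 0)
      (PySem.List.pyRange 0 r 1)
      _
      (PySem.List.nodup_pyRange_one _ _)
      (fun j hj => (PySem.List.mem_pyRange_one.mp hj).1)
      (fun p hp => (PySem.List.mem_pyRange_one.mp hp).1)
      hg]
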